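-- pv_equiv track=rewrite | github.com/Aditya-Londhe1/Aayur_AI | backend/app/services/consultation_service.py | _get_symptom_recommendations
-- ===== SOURCE A (Python) =====
-- from typing import Dict, Any, List, Optional
--
-- def _get_symptom_recommendations(symptom_analysis: Dict[str, Any]) -> Dict[str, List[str]]:
--     """Get recommendations based on symptom analysis"""
--     recommendations = {"dietary": [], "lifestyle": [], "herbal": []}
--
--     likely_conditions = symptom_analysis.get("likely_conditions", [])
--     for condition in likely_conditions:
--         condition_name = condition.get("name", "").lower()
--
--         if "digestive" in condition_name:
--             recommendations["dietary"].append("Eat easily digestible foods")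
--             recommendations["herbal"].append("Ginger tea for digestion")
--         elif "stress" in condition_name:
--             recommendations["lifestyle"].append("Practice stress management")
--             recommendations["herbal"].append("Ashwagandha for stress relief")
--         elif "sleep" in condition_name:
--             recommendations["lifestyle"].append("Maintain sleep hygiene")
--             recommendations["herbal"].append("Chamomile tea before bed")
--
--     return recommendations
-- ===== SOURCE B (Python) =====
-- # Rule-table rewrite: one ordered keyword->messages table, first-match per condition,
-- # output dict built per-category from the matched message lists.
-- RULES = [
--     ("digestive", [("dietary", "Eat easily digestible foods"),
--                    ("herbal", "Ginger tea for digestion")]),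
--     ("stress", [("lifestyle", "Practice stress management"),
--                 ("herbal", "Ashwagandha for stress relief")]),
--     ("sleep", [("lifestyle", "Maintain sleep hygiene"),
--                ("herbal", "Chamomile tea before bed")]),
-- ]
--
--
-- def _get_symptom_recommendations(symptom_analysis):
--     """Get recommendations based on symptom analysis"""
--     matched = []
--     for condition in symptom_analysis.get("likely_conditions", []):
--         name = condition.get("name", "").lower()
--         for keyword, messages in RULES:
--             if keyword in name:
--                 matched.append(messages)
--                 break
--     return {cat: [m for messages in matched for c, m in messages if c == cat]
--             for cat in ("dietary", "lifestyle", "herbal")}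
-- ===== Notes on version B (the rewrite author's own statement) =====
-- stated objective: idiomatic
-- what changed: Replaces the hard-coded if/elif chain mutating a dict with a declarative ordered rule table (keyword -> (category, message) list), a first-match lookup per condition, and a per-category comprehension that assembles the result dict.
import Mathlib
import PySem

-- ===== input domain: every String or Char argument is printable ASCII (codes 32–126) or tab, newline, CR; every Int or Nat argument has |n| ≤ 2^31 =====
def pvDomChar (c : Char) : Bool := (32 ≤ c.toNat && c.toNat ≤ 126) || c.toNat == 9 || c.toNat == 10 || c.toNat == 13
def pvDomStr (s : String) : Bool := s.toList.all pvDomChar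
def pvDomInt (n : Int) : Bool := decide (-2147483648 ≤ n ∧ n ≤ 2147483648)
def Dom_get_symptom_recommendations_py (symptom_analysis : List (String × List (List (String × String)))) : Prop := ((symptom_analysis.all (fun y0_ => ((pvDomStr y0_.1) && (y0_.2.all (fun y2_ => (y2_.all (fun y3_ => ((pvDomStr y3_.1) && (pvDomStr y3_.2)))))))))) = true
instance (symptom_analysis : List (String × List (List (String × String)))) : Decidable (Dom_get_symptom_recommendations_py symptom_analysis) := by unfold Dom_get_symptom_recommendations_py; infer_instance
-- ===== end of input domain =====

-- B replaces A's if/elif chain over a mutated dict by an ordered rule table with a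
-- first-match lookup per condition and per-category assembly (objective: idiomatic).

-- ===== PORT A =====
-- the dict {"dietary": d, "lifestyle": l, "herbal": h} is carried as the triple (d, l, h)
def pvStepA (r : List String × List String × List String) (condition : List (String × String)) :
    List String × List String × List String :=
  let condition_name := PySem.Str.lower (PySem.Dict.getD (PySem.Dict.mk condition) "name" "")
  if PySem.Str.isIn "digestive" condition_name then
    (r.1 ++ ["Eat easily digestible foods"], r.2.1, r.2.2 ++ ["Ginger tea for digestion"])
  else if PySem.Str.isIn "stress" condition_name then
    (r.1, r.2.1 ++ ["Practice stress management"], r.2.2 ++ ["Ashwagandha for stress relief"])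
  else if PySem.Str.isIn "sleep" condition_name then
    (r.1, r.2.1 ++ ["Maintain sleep hygiene"], r.2.2 ++ ["Chamomile tea before bed"])
  else r

def get_symptom_recommendations_py (symptom_analysis : List (String × List (List (String × String)))) : List (String × List String) :=
  let likely_conditions := PySem.Dict.getD (PySem.Dict.mk symptom_analysis) "likely_conditions" []
  let r := likely_conditions.foldl pvStepA ([], [], [])
  [("dietary", r.1), ("lifestyle", r.2.1), ("herbal", r.2.2)]

-- ===== PORT B =====
def pvRules : List (String × List (String × String)) :=
  [("digestive", [("dietary", "Eat easily digestible foods"),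
                  ("herbal", "Ginger tea for digestion")]),
   ("stress", [("lifestyle", "Practice stress management"),
               ("herbal", "Ashwagandha for stress relief")]),
   ("sleep", [("lifestyle", "Maintain sleep hygiene"),
              ("herbal", "Chamomile tea before bed")])]

def get_symptom_recommendations_py_alt (symptom_analysis : List (String × List (List (String × String)))) : List (String × List String) :=
  let conds := PySem.Dict.getD (PySem.Dict.mk symptom_analysis) "likely_conditions" []
  let matched := conds.filterMap (fun condition =>
    (pvRules.find? (fun rule =>
      PySem.Str.isIn rule.1 (PySem.Str.lower (PySem.Dict.getD (PySem.Dict.mk condition) "name" "")))).map (·.2))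
  ["dietary", "lifestyle", "herbal"].map (fun cat =>
    (cat, matched.flatMap (fun messages => (messages.filter (fun p => p.1 == cat)).map (·.2))))

-- ===== PRECONDITION & SPEC =====
def Spec_get_symptom_recommendations_py (symptom_analysis : List (String × List (List (String × String)))) (out : List (String × List String)) : Prop := out = get_symptom_recommendations_py_alt symptom_analysis
instance (symptom_analysis : List (String × List (List (String × String)))) (out : List (String × List String)) : Decidable (Spec_get_symptom_recommendations_py symptom_analysis out) := by unfold Spec_get_symptom_recommendations_py; infer_instance

-- ===== CLAIM (what is proved, stated in full; the proofs are below) =====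
def Claim_equal_get_symptom_recommendations_py : Prop := ∀ (symptom_analysis : List (String × List (List (String × String)))), Dom_get_symptom_recommendations_py symptom_analysis → Spec_get_symptom_recommendations_py symptom_analysis (get_symptom_recommendations_py symptom_analysis)

-- ===== LEMMAS AND PROOFS =====
-- B's message list for one category out of the matched rules of `conds`
def pvCat (cat : String) (conds : List (List (String × String))) : List String :=
  (conds.filterMap (fun condition =>
    (pvRules.find? (fun rule =>
      PySem.Str.isIn rule.1 (PySem.Str.lower (PySem.Dict.getD (PySem.Dict.mk condition) "name" "")))).map (·.2))).flatMap
    (fun messages => (messages.filter (fun p => p.1 == cat)).map (·.2))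

theorem pvFold_eq (conds : List (List (String × String))) :
    ∀ d l h : List String,
      conds.foldl pvStepA (d, l, h) =
        (d ++ pvCat "dietary" conds, l ++ pvCat "lifestyle" conds, h ++ pvCat "herbal" conds) := by
  induction conds with
  | nil => intro d l h; simp [pvCat]
  | cons c cs ih =>
    intro d l h
    simp only [List.foldl_cons]
    by_cases h1 : PySem.Str.isIn "digestive"
        (PySem.Str.lower (PySem.Dict.getD (PySem.Dict.mk c) "name" "")) = true
    · simp at h1
      simp [pvStepA, h1, ih, pvCat, pvRules, List.find?]
    · by_cases h2 : PySem.Str.isIn "stress"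
          (PySem.Str.lower (PySem.Dict.getD (PySem.Dict.mk c) "name" "")) = true
      · simp at h1 h2
        simp [pvStepA, h1, h2, ih, pvCat, pvRules, List.find?]
      · by_cases h3 : PySem.Str.isIn "sleep"
            (PySem.Str.lower (PySem.Dict.getD (PySem.Dict.mk c) "name" "")) = true
        · simp at h1 h2 h3
          simp [pvStepA, h1, h2, h3, ih, pvCat, pvRules, List.find?]
        · simp at h1 h2 h3
          simp [pvStepA, h1, h2, h3, ih, pvCat, pvRules, List.find?]

-- ===== VERDICT (by name: the statement is the Claim_ definition above) =====
theorem get_symptom_recommendations_py_spec : Claim_equal_get_symptom_recommendations_py := by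
  intro sa _
  unfold Spec_get_symptom_recommendations_py get_symptom_recommendations_py get_symptom_recommendations_py_alt
  simp only [pvFold_eq, pvCat, List.map, List.nil_append]
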